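-- pv_equiv track=rewrite | github.com/RiderDiaz2/hack_python_2 | hack_1.py | fn_hack_1
-- ===== SOURCE A (Python) =====
-- def fn_hack_1(s):
--     result_parts = []
--     for i in range(0, len(s), 3):
--         chunk = s[i : i + 3]
--
--         if len(chunk) == 3:
--             modified_chunk = f"{chunk[0]}{chunk[1].upper()}{chunk[2]}"
--             result_parts.append(modified_chunk)
--         else:
--             result_parts.append(chunk)
--
--     return "".join(result_parts)
-- ===== SOURCE B (Python) =====
-- def fn_hack_1(s):
--     n = len(s)
--     return "".join(
--         c.upper() if (i % 3 == 1 and i <= n - 2) else c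
--         for i, c in enumerate(s)
--     )
-- ===== Notes on version B (the rewrite author's own statement) =====
-- stated objective: idiomatic
-- what changed: Replaced the chunk-slicing loop (build 3-char slices, rebuild and join parts) by a single character-wise pass with enumerate that uppercases exactly the characters at index i with i % 3 == 1 and i <= len(s)-2 (middle of a complete chunk).
import Mathlib
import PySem

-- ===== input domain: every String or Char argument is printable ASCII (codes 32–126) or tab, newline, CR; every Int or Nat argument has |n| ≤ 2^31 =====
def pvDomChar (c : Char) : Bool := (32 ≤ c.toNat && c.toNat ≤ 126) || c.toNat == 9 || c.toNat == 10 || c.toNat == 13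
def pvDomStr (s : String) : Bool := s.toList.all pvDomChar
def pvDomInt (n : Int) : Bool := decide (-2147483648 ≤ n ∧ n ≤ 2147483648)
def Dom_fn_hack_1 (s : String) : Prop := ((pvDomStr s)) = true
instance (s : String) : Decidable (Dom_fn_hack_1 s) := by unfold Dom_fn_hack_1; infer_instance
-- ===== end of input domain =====

-- B replaces A's 3-char-chunk slicing loop by a single character-wise pass (idiomatic; same O(n) cost).

-- ===== PORT A =====
-- for i in range(0, len(s), 3): chunk = s[i:i+3]; append the (modified) chunk; "".join at the end
def fn_hack_1 (s : String) : String :=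
  let cs := s.toList
  let parts :=
    (PySem.List.pyRange 0 (PySem.List.len cs) 3).foldl
      (fun (acc : List (List Char)) (i : Int) =>
        let chunk := PySem.List.slice cs (some i) (some (i + 3))
        if PySem.List.len chunk == 3 then
          acc ++ [[PySem.List.pyGetD chunk 0 ' ',
                   PySem.Chars.upperChar (PySem.List.pyGetD chunk 1 ' '),
                   PySem.List.pyGetD chunk 2 ' ']]
        else
          acc ++ [chunk]) []
  String.ofList (PySem.Chars.join [] parts)

-- ===== PORT B =====
-- n = len(s); join over enumerate(s): uppercase c exactly when i % 3 == 1 and i <= n - 2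
def fn_hack_1_alt (s : String) : String :=
  let cs := s.toList
  let n := PySem.List.len cs
  String.ofList
    ((PySem.List.enumerate cs 0).map
      (fun p => if PySem.Int.mod p.1 3 == 1 && decide (p.1 ≤ n - 2)
                then PySem.Chars.upperChar p.2 else p.2))

-- ===== PRECONDITION & SPEC =====
def Spec_fn_hack_1 (s : String) (out : String) : Prop := out = fn_hack_1_alt s
instance (s : String) (out : String) : Decidable (Spec_fn_hack_1 s out) := by unfold Spec_fn_hack_1; infer_instance

-- ===== CLAIM (what is proved, stated in full; the proofs are below) =====
def Claim_equal_fn_hack_1 : Prop := ∀ (s : String), Dom_fn_hack_1 s → Spec_fn_hack_1 s (fn_hack_1 s)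

-- ===== LEMMAS AND PROOFS =====

-- both programs, characterised three characters at a time
def pvSpec : List Char → List Char
  | a :: b :: c :: rest => a :: PySem.Chars.upperChar b :: c :: pvSpec rest
  | cs => cs

-- A's per-chunk step, as a function of the chunk start index
def gA (cs : List Char) (i : Int) : List Char :=
  let chunk := PySem.List.slice cs (some i) (some (i + 3))
  if PySem.List.len chunk == 3 then
    [PySem.List.pyGetD chunk 0 ' ',
     PySem.Chars.upperChar (PySem.List.pyGetD chunk 1 ' '),
     PySem.List.pyGetD chunk 2 ' ']
  else chunk

theorem pyRange3_cons (m : Nat) :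
    PySem.List.pyRange 0 (3 + (m : Int)) 3
      = 0 :: (PySem.List.pyRange 0 (m : Int) 3).map (· + 3) := by
  rw [PySem.List.pyRange_of_pos _ _ (by norm_num : (0:Int) < 3),
      PySem.List.pyRange_of_pos _ _ (by norm_num : (0:Int) < 3)]
  have h1 : (if (0:Int) < 3 + (m:Int) then ((3 + (m:Int) - 0 + 3 - 1) / 3).toNat else 0)
      = (((m:Int) + 2) / 3).toNat + 1 := by split <;> omega
  have h2 : (if (0:Int) < (m:Int) then (((m:Int) - 0 + 3 - 1) / 3).toNat else 0)
      = (((m:Int) + 2) / 3).toNat := by split <;> omega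
  rw [h1, h2, List.range_succ_eq_map]
  simp only [List.map_cons, List.map_map]
  refine List.cons_eq_cons.mpr ⟨by norm_num, ?_⟩
  apply List.map_congr_left
  intro k _
  simp only [Function.comp_apply]
  push_cast
  ring

theorem gA_shift (a b c : Char) (rest : List Char) (j : Int) (hj : 0 ≤ j) :
    gA (a :: b :: c :: rest) (j + 3) = gA rest j := by
  have hchunk : PySem.List.slice (a :: b :: c :: rest) (some (j+3)) (some (j+3+3))
      = PySem.List.slice rest (some j) (some (j+3)) := by
    rw [PySem.List.slice_toNat _ (by omega) (by omega), PySem.List.slice_toNat _ hj (by omega)]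
    rw [show (j + 3 + 3).toNat - (j + 3).toNat = 3 from by omega,
        show (j + 3).toNat - j.toNat = 3 from by omega,
        show (j + 3).toNat = 3 + j.toNat from by omega, ← List.drop_drop]
    rfl
  simp only [gA, hchunk]

theorem gA_head (a b c : Char) (rest : List Char) :
    gA (a :: b :: c :: rest) 0 = [a, PySem.Chars.upperChar b, c] := by
  have hchunk : PySem.List.slice (a :: b :: c :: rest) (some 0) (some (0+3)) = [a, b, c] := by
    rw [PySem.List.slice_toNat _ (by omega) (by omega)]; rfl
  simp only [gA, hchunk]
  simp [PySem.List.len_eq, PySem.List.pyGetD, PySem.List.pyGet?, PySem.List.pyIdx?]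

theorem join_empty (ps : List (List Char)) : PySem.Chars.join [] ps = ps.flatten := by
  induction ps with
  | nil => rfl
  | cons h t ih => cases t <;> simp_all [PySem.Chars.join_singleton, PySem.Chars.join_cons_cons]

theorem A_flatten (cs : List Char) :
    (List.map (gA cs) (PySem.List.pyRange 0 (PySem.List.len cs) 3)).flatten = pvSpec cs := by
  induction cs using pvSpec.induct with
  | case1 a b c rest ih =>
    have hlen : PySem.List.len (a :: b :: c :: rest) = 3 + (rest.length : Int) := by
      simp [PySem.List.len_eq]; ring
    rw [hlen, pyRange3_cons]
    rw [List.map_cons, List.map_map, gA_head]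
    have hmap : List.map (gA (a :: b :: c :: rest) ∘ (· + 3)) (PySem.List.pyRange 0 (rest.length : Int) 3)
        = List.map (gA rest) (PySem.List.pyRange 0 (PySem.List.len rest) 3) := by
      rw [show PySem.List.len rest = (rest.length : Int) from by simp [PySem.List.len_eq]]
      apply List.map_congr_left
      intro j hj
      have h0 : (0:Int) ≤ j := ((PySem.List.mem_pyRange_iff_of_pos (by norm_num) j).mp hj).1
      simpa using gA_shift a b c rest j h0
    rw [hmap, List.flatten_cons, ih]
    rfl
  | case2 cs hno =>
    rcases cs with _ | ⟨a, _ | ⟨b, _ | ⟨c, r⟩⟩⟩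
    · have : PySem.List.len ([] : List Char) = 0 := by simp [PySem.List.len_eq]
      rw [this, show PySem.List.pyRange 0 (0:Int) 3 = [] from by decide]
      rfl
    · have : PySem.List.len ([a] : List Char) = 1 := by simp [PySem.List.len_eq]
      rw [this, show PySem.List.pyRange 0 (1:Int) 3 = [0] from by decide]
      have hch : PySem.List.slice ([a]) (some 0) (some (0+3)) = [a] := by
        rw [PySem.List.slice_toNat _ (by omega) (by omega)]; rfl
      simp only [List.map_cons, List.map_nil, List.flatten_cons, List.flatten_nil]
      simp only [gA, hch, PySem.List.len_eq, List.length_cons, List.length_nil]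
      norm_num [pvSpec]
    · have : PySem.List.len ([a, b] : List Char) = 2 := by simp [PySem.List.len_eq]
      rw [this, show PySem.List.pyRange 0 (2:Int) 3 = [0] from by decide]
      have hch : PySem.List.slice ([a, b]) (some 0) (some (0+3)) = [a, b] := by
        rw [PySem.List.slice_toNat _ (by omega) (by omega)]; rfl
      simp only [List.map_cons, List.map_nil, List.flatten_cons, List.flatten_nil]
      simp only [gA, hch, PySem.List.len_eq, List.length_cons, List.length_nil]
      norm_num [pvSpec]
    · exact absurd rfl (hno a b c r · )

theorem B_map (cs : List Char) (k : Nat) (n : Int) (hn : n = 3 * (k : Int) + (cs.length : Int)) :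
    (PySem.List.enumerate cs (3 * (k : Int))).map
      (fun p => if PySem.Int.mod p.1 3 == 1 && decide (p.1 ≤ n - 2)
                then PySem.Chars.upperChar p.2 else p.2) = pvSpec cs := by
  induction cs using pvSpec.induct generalizing k with
  | case1 a b c rest ih =>
    rw [PySem.List.enumerate_cons, PySem.List.enumerate_cons, PySem.List.enumerate_cons]
    simp only [List.map_cons]
    have hm0 : (3 * (k:Int)) % 3 = 0 := by omega
    have hm1 : (3 * (k:Int) + 1) % 3 = 1 := by omega
    have hm2 : (3 * (k:Int) + 1 + 1) % 3 = 2 := by omega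
    have hle : 3 * (k:Int) + 1 ≤ n - 2 := by
      simp only [List.length_cons] at hn; push_cast at hn; omega
    have htail : 3 * (k:Int) + 1 + 1 + 1 = 3 * ((k + 1 : Nat) : Int) := by push_cast; ring
    rw [htail, ih (k + 1) (by simp only [List.length_cons] at hn ⊢; push_cast at hn ⊢; omega)]
    simp [hm0, hm1, hm2, hle, pvSpec]
  | case2 cs hno =>
    rcases cs with _ | ⟨a, _ | ⟨b, _ | ⟨c, r⟩⟩⟩
    · rfl
    · have h1 : ¬ (3 * (k:Int) ≤ n - 2) := by
        simp only [List.length_cons, List.length_nil] at hn; omega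
      simp [PySem.List.enumerate_cons, h1, pvSpec]
    · have hm0 : (3 * (k:Int)) % 3 = 0 := by omega
      have h1 : ¬ (3 * (k:Int) + 1 ≤ n - 2) := by
        simp only [List.length_cons, List.length_nil] at hn; omega
      simp [PySem.List.enumerate_cons, hm0, h1, pvSpec]
    · exact absurd rfl (hno a b c r · )

-- ===== VERDICT (by name: the statement is the Claim_ definition above) =====
theorem fn_hack_1_spec : Claim_equal_fn_hack_1 := by
  intro s _
  unfold Spec_fn_hack_1 fn_hack_1 fn_hack_1_alt
  have hfun :
      (fun (acc : List (List Char)) (i : Int) =>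
        let chunk := PySem.List.slice s.toList (some i) (some (i + 3))
        if PySem.List.len chunk == 3 then
          acc ++ [[PySem.List.pyGetD chunk 0 ' ',
                   PySem.Chars.upperChar (PySem.List.pyGetD chunk 1 ' '),
                   PySem.List.pyGetD chunk 2 ' ']]
        else acc ++ [chunk])
      = fun (acc : List (List Char)) (i : Int) => acc ++ [gA s.toList i] := by
    funext acc i
    simp only [gA]
    split <;> rfl
  simp only [hfun, PySem.List.foldl_append_singleton_eq_map, List.nil_append, join_empty]
  rw [A_flatten]
  rw [show (PySem.List.enumerate s.toList 0) = PySem.List.enumerate s.toList (3 * ((0 : Nat) : Int))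
        from by norm_num,
      show PySem.List.len s.toList = 3 * ((0 : Nat) : Int) + (s.toList.length : Int)
        from by simp [PySem.List.len_eq],
      B_map s.toList 0 _ rfl]
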